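-- pv_equiv track=rewrite | github.com/devgrug22/WorkingOnStuff | gamev2.py | player_stats
-- ===== SOURCE A (Python) =====
-- characters_and_stats= {
--     'warrior': {'strenght': 5, 'intelligence': 1, 'dexterity': 2, 'hp': 10, 'experience': 0,  'description': 'warrior: uses 2h weapons and has the highest health pool'},
--
--     'mage': {'strenght': 1, 'intelligence': 5, 'dexterity': 3, 'hp': 5, 'experience': 0, 'description': 'mage: can cast powerfull spells, but has the lowest health pool'},
--
--     'ranger': {'strenght': 2, 'intelligence': 2, 'dexterity': 5, 'hp': 8, 'experience': 0, 'description': 'ranger: uses bows and is a lot more survivable then a mage'}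
-- }
--
-- def player_stats(character_class):
--     player_strength = 0
--     player_intelligence = 0
--     player_dexterity = 0
--     player_hp = 0
--     if character_class == 'w':
--         for key, value in characters_and_stats['warrior'].items():
--
--             if key == 'strenght':
--                 player_strength = value
--             elif key == 'intelligence':
--                 player_intelligence = value
--             elif key == 'dexterity':
--                 player_dexterity = value
--             elif key == 'hp':
--                 player_hp = value
--
--     elif character_class == 'm':
--         for key, value in characters_and_stats['mage'].items():
--             if key == 'strenght':
--                 player_strength = value
--             elif key == 'intelligence':
--                 player_intelligence = value
--             elif key == 'dexterity':
--                 player_dexterity = value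
--             elif key == 'hp':
--                 player_hp = value
--
--     elif character_class == 'r':
--         for key, value in characters_and_stats['ranger'].items():
--             if key == 'strenght':
--                 player_strength = value
--             elif key == 'intelligence':
--                 player_intelligence = value
--             elif key == 'dexterity':
--                 player_dexterity = value
--             elif key == 'hp':
--                 player_hp = value
--
--     return player_strength, player_intelligence, player_dexterity, player_hp
-- ===== SOURCE B (Python) =====
-- characters_and_stats = {
--     'warrior': {'strenght': 5, 'intelligence': 1, 'dexterity': 2, 'hp': 10, 'experience': 0,  'description': 'warrior: uses 2h weapons and has the highest health pool'},
--     'mage': {'strenght': 1, 'intelligence': 5, 'dexterity': 3, 'hp': 5, 'experience': 0, 'description': 'mage: can cast powerfull spells, but has the lowest health pool'},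
--     'ranger': {'strenght': 2, 'intelligence': 2, 'dexterity': 5, 'hp': 8, 'experience': 0, 'description': 'ranger: uses bows and is a lot more survivable then a mage'}
-- }
--
-- _CLASS_OF_LETTER = {'w': 'warrior', 'm': 'mage', 'r': 'ranger'}
--
-- def player_stats(character_class):
--     name = _CLASS_OF_LETTER.get(character_class)
--     if name is None:
--         return 0, 0, 0, 0
--     d = characters_and_stats[name]
--     return d['strenght'], d['intelligence'], d['dexterity'], d['hp']
-- ===== Notes on version B (the rewrite author's own statement) =====
-- stated objective: simpler
-- what changed: Replaces the three copy-pasted scan-and-match loops over dict items with a letter-to-name dispatch dict and four direct keyed reads, returning (0,0,0,0) when the letter is unrecognized.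
import Mathlib
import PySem

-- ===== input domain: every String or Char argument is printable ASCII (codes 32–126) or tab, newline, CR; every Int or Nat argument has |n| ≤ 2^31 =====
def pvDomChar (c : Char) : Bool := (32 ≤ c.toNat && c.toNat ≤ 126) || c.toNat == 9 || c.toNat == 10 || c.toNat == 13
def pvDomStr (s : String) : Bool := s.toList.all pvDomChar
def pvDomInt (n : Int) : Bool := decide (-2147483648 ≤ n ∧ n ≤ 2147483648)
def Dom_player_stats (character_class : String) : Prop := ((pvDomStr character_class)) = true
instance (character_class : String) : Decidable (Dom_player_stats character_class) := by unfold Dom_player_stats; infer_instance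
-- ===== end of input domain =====

-- ===== PORT A =====
-- B changes: replaces A's three copy-pasted item-scan loops with a letter->name dispatch
-- dict and direct keyed reads of the four stats (objective: simpler).
-- The stat dicts mix int and string values; the string-valued 'description' entry is
-- modeled as `none` (neither program ever reads it as a value).
def warriorItems : List (String × Option Int) :=
  [("strenght", some 5), ("intelligence", some 1), ("dexterity", some 2),
   ("hp", some 10), ("experience", some 0), ("description", none)]
def mageItems : List (String × Option Int) :=
  [("strenght", some 1), ("intelligence", some 5), ("dexterity", some 3),
   ("hp", some 5), ("experience", some 0), ("description", none)]
def rangerItems : List (String × Option Int) :=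
  [("strenght", some 2), ("intelligence", some 2), ("dexterity", some 5),
   ("hp", some 8), ("experience", some 0), ("description", none)]

-- the for-loop body A repeats verbatim in each of its three branches; `.getD 0` is exact
-- because every key that reaches an assignment carries an int (`some`) value
def pvLoopA (items : List (String × Option Int)) (init : Int × Int × Int × Int) :
    Int × Int × Int × Int :=
  items.foldl (fun st kv =>
    if kv.1 == "strenght" then (kv.2.getD 0, st.2.1, st.2.2.1, st.2.2.2)
    else if kv.1 == "intelligence" then (st.1, kv.2.getD 0, st.2.2.1, st.2.2.2)
    else if kv.1 == "dexterity" then (st.1, st.2.1, kv.2.getD 0, st.2.2.2)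
    else if kv.1 == "hp" then (st.1, st.2.1, st.2.2.1, kv.2.getD 0)
    else st) init

def player_stats (character_class : String) : Int × Int × Int × Int :=
  let init : Int × Int × Int × Int := (0, 0, 0, 0)
  if character_class == "w" then pvLoopA warriorItems init
  else if character_class == "m" then pvLoopA mageItems init
  else if character_class == "r" then pvLoopA rangerItems init
  else init

-- ===== PORT B =====
def classOfLetter : PySem.Dict String String :=
  PySem.Dict.ofList [("w", "warrior"), ("m", "mage"), ("r", "ranger")]

def charactersAndStatsB : PySem.Dict String (PySem.Dict String (Option Int)) :=
  PySem.Dict.ofList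
    [("warrior", PySem.Dict.ofList warriorItems),
     ("mage", PySem.Dict.ofList mageItems),
     ("ranger", PySem.Dict.ofList rangerItems)]

-- d[k] for the four stat keys: always present with an int value in the literal dicts,
-- so the two getD defaults are never reached (no KeyError in Source B)
def statGet (d : PySem.Dict String (Option Int)) (k : String) : Int :=
  ((PySem.Dict.get? d k).getD none).getD 0

def player_stats_alt (character_class : String) : Int × Int × Int × Int :=
  match PySem.Dict.get? classOfLetter character_class with
  | none => (0, 0, 0, 0)
  | some name =>
    match PySem.Dict.get? charactersAndStatsB name with
    | none => (0, 0, 0, 0)  -- unreachable: every dispatch value is a key of the stats dict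
    | some d => (statGet d "strenght", statGet d "intelligence",
                 statGet d "dexterity", statGet d "hp")

-- ===== PRECONDITION & SPEC =====
def Spec_player_stats (character_class : String) (out : Int × Int × Int × Int) : Prop := out = player_stats_alt character_class
instance (character_class : String) (out : Int × Int × Int × Int) : Decidable (Spec_player_stats character_class out) := by unfold Spec_player_stats; infer_instance

-- ===== CLAIM =====
def Claim_equal_player_stats : Prop := ∀ (character_class : String), Dom_player_stats character_class → Spec_player_stats character_class (player_stats character_class)

-- ===== LEMMAS AND PROOFS =====
theorem pv_other (s : String) (h1 : s ≠ "w") (h2 : s ≠ "m") (h3 : s ≠ "r") :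
    PySem.Dict.get? classOfLetter s = none := by
  simp only [classOfLetter, PySem.Dict.ofList, PySem.Dict.get?]
  have hit : (PySem.Dict.empty.update [("w", "warrior"), ("m", "mage"), ("r", "ranger")]).items
      = [("w", "warrior"), ("m", "mage"), ("r", "ranger")] := by decide
  rw [hit, Option.map_eq_none_iff, List.find?_eq_none]
  intro kv hkv
  simp only [List.mem_cons, List.not_mem_nil, or_false] at hkv
  rcases hkv with h | h | h <;> subst h <;> simp only [beq_iff_eq] <;>
    first
      | exact fun he => h1 he.symm
      | exact fun he => h2 he.symm
      | exact fun he => h3 he.symm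

-- ===== VERDICT =====
theorem player_stats_spec : Claim_equal_player_stats := by
  intro s _
  unfold Spec_player_stats
  by_cases h1 : s = "w"
  · subst h1; decide
  · by_cases h2 : s = "m"
    · subst h2; decide
    · by_cases h3 : s = "r"
      · subst h3; decide
      · simp [player_stats, player_stats_alt, pv_other s h1 h2 h3, h1, h2, h3]
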